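-- pv_equiv track=rewrite | github.com/enhoshen/svutil | svutil/SVgen.py | find_format_width
-- ===== SOURCE A (Python) =====
-- def find_format_width(lst):
--     """
--     Find from a list of strings the largest width,
--     used in format string formatting the seperation width.
--     lst is a list of tuple or string, return a tuple of
--     integer or a single integer of the width.
--     """
--     if len(lst) == 0:
--         return 0
--     if type(lst[0]) == str:
--         w = 0
--         for i in lst:
--             w = max(w, len(i))
--         return w
--     if type(lst[0]) == tuple:
--         w = [0 for i in lst[0]]
--         for i in lst:
--             for idx, j in enumerate(i):
--                 w[idx] = max(w[idx], len(j))
--         return w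
-- ===== SOURCE B (Python) =====
-- def find_format_width(lst):
--     if len(lst) == 0:
--         return 0
--     if type(lst[0]) == str:
--         return max(map(len, lst))
--     if type(lst[0]) == tuple:
--         return [max(len(j) for j in col) for col in zip(*lst)]
-- ===== Notes on version B (the rewrite author's own statement) =====
-- stated objective: idiomatic
-- what changed: replaces the explicit Python-level running-max accumulator loop with builtin max over map(len, lst) (and a column-wise zip-transpose reduction for the tuple branch)
import Mathlib
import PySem

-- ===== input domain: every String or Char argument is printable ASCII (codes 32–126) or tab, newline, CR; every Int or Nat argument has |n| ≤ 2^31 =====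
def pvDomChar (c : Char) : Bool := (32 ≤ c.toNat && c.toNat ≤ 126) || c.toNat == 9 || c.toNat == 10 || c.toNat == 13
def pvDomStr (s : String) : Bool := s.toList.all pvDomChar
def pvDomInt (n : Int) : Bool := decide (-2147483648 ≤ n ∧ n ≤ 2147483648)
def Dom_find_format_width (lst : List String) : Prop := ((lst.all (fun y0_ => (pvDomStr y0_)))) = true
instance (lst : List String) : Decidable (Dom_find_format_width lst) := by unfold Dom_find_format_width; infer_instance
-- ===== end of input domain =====

-- B replaces A's explicit running-max accumulator loop with the idiomatic max over mapped lengths (objective: idiomatic).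
-- Under the List String signature only A's string branch (and the empty guard) is reachable; the tuple branch is dead here.

-- ===== PORT A =====
-- A: empty guard returns 0; else a running-max loop 'w = max(w, len(i))' over the list.
def find_format_width (lst : List String) : Int :=
  if lst.length = 0 then 0
  else lst.foldl (fun w i => max w (PySem.Str.len i)) 0

-- ===== PORT B =====
-- B: empty guard returns 0; else max(map(len, lst)) — ported via PySem.List.max? (first extremal).
def find_format_width_alt (lst : List String) : Int :=
  if lst.length = 0 then 0
  else match PySem.List.max? (lst.map PySem.Str.len) (fun x => x) with
       | some m => m
       | none => 0   -- unreachable: the list is nonempty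

-- ===== PRECONDITION & SPEC =====
def Spec_find_format_width (lst : List String) (out : Int) : Prop := out = find_format_width_alt lst
instance (lst : List String) (out : Int) : Decidable (Spec_find_format_width lst out) := by unfold Spec_find_format_width; infer_instance

-- ===== CLAIM (what is proved, stated in full; the proofs are below) =====
def Claim_equal_find_format_width : Prop := ∀ (lst : List String), Dom_find_format_width lst → Spec_find_format_width lst (find_format_width lst)

-- ===== LEMMAS AND PROOFS =====

theorem pv_foldl_max_len (t : List String) (a : Int) :
    t.foldl (fun w i => max w (PySem.Str.len i)) a = (t.map PySem.Str.len).foldl max a := by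
  induction t generalizing a with
  | nil => rfl
  | cons h tl ih =>
    simp only [List.foldl_cons, List.map_cons]
    exact ih _

-- ===== VERDICT (by name: the statement is the Claim_ definition above) =====
theorem find_format_width_spec : Claim_equal_find_format_width := by
  intro lst _
  unfold Spec_find_format_width find_format_width find_format_width_alt
  cases lst with
  | nil => rfl
  | cons h t =>
    rw [if_neg (by simp), if_neg (by simp)]
    rw [List.map_cons, PySem.List.max?_id_cons]
    rw [pv_foldl_max_len, List.map_cons, List.foldl_cons]
    have hnn : (0 : Int) ≤ PySem.Str.len h := by
      simp [PySem.Str.len_eq]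
    rw [max_eq_right hnn]
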